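-- pv_equiv track=rewrite | github.com/jiu6525/baekjoon | 프로그래머스/unrated/135808. 과일 장수/과일 장수.py | solution
-- ===== SOURCE A (Python) =====
-- def solution(k, m, score):
--     score.sort(reverse=True)
--     r = []
--     answer = 0
--     for i in range(len(score)):
--         r.append(score[i])
--         if len(r) == m:
--             answer += min(r)*m
--             r = []
--
--     return answer
-- ===== SOURCE B (Python) =====
-- def solution(k, m, score):
--     d = sorted(score, reverse=True)
--     return m * sum(d[i] for i in range(m - 1, len(d), m))
-- ===== Notes on version B (the rewrite author's own statement) =====
-- stated objective: simpler
-- what changed: Instead of maintaining a running group buffer and recomputing min() for every full group, B notes that in a descending-sorted list the minimum of each m-chunk is its last element, so it sums the elements at positions m-1, 2m-1, ... directly; no buffer and no min() scans.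
-- outside the precondition, e.g. on solution(1, 0, [1]): A returns 0, B raises ValueError
import Mathlib
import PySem

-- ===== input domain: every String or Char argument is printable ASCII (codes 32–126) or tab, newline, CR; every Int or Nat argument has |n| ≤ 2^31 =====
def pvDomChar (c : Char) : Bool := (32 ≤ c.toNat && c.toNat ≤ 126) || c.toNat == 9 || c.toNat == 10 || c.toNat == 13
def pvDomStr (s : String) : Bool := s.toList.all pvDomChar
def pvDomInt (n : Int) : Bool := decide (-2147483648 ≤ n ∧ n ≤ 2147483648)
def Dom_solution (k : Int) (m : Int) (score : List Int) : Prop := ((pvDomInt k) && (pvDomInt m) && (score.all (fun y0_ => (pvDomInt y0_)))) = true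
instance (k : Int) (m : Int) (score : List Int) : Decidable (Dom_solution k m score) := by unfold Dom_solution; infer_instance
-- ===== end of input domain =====

-- B replaces A's running group buffer + per-group min() scans by summing the chunk-last elements
-- of the descending sort directly (objective: simpler).  A sorts `score` in place (an observable
-- mutation); B does not — the equivalence proved here is about the return value only.

-- ===== PORT A =====
-- A's for-loop: state (r, answer), iterating over the descending-sorted list
def solLoopA (m : Int) : List Int → List Int → Int → Int
  | [], _, ans => ans
  | x :: xs, r, ans =>
    let r' := r ++ [x]
    if (r'.length : Int) = m then
      solLoopA m xs [] (ans + ((PySem.List.min? r' (fun y => y)).getD 0) * m)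
    else
      solLoopA m xs r' ans

def solution (k : Int) (m : Int) (score : List Int) : Int :=
  solLoopA m (PySem.List.sorted score (fun x => x) true) [] 0

-- ===== PORT B =====
def solution_alt (k : Int) (m : Int) (score : List Int) : Int :=
  let d := PySem.List.sorted score (fun x => x) true
  m * ((PySem.List.pyRange (m - 1) (d.length : Int) m).map
        (fun i => PySem.List.pyGetD d i 0)).sum

-- ===== PRECONDITION & SPEC =====
-- Pre_ excludes only m = 0, where B's range(m-1, len(d), m) raises ValueError (zero step)
-- while A returns 0 (its group-full test can never fire); A itself returns on every input.
def Pre_solution (k : Int) (m : Int) (score : List Int) : Prop := m ≠ 0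
instance (k : Int) (m : Int) (score : List Int) : Decidable (Pre_solution k m score) := by unfold Pre_solution; infer_instance

def pvWitness_solution : Int × Int × List Int := (4, 3, [1, 2, 3, 1, 2, 3, 1])

def Spec_solution (k : Int) (m : Int) (score : List Int) (out : Int) : Prop := out = solution_alt k m score
instance (k : Int) (m : Int) (score : List Int) (out : Int) : Decidable (Spec_solution k m score out) := by unfold Spec_solution; infer_instance

-- ===== CLAIM (what is proved, stated in full; the proofs are below) =====
def Claim_equal_solution : Prop := ∀ (k : Int) (m : Int) (score : List Int), Dom_solution k m score → Pre_solution k m score → Spec_solution k m score (solution k m score)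

-- ===== LEMMAS AND PROOFS =====

-- proof-side skeleton: the elements at positions j, j+M, j+2M, … of a list
def pickGroup (M : Nat) : Nat → List Int → List Int
  | _, [] => []
  | j, x :: xs => if j = 0 then x :: pickGroup M (M - 1) xs else pickGroup M (j - 1) xs

-- negative step with start ≤ stop: the range is empty
theorem pyRange_neg_empty {a b s : Int} (hs : s < 0) (hab : a ≤ b) :
    PySem.List.pyRange a b s = [] := by
  unfold PySem.List.pyRange
  have h1 : ¬ s = 0 := by omega
  have h2 : ¬ 0 < s := by omega
  have h3 : ¬ b < a := by omega
  simp [h1, h2, h3]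

-- A's loop does nothing when m < 0 (a group length is never negative)
theorem solLoopA_neg {m : Int} (hm : m < 0) :
    ∀ (xs r : List Int) (ans : Int), solLoopA m xs r ans = ans := by
  intro xs
  induction xs with
  | nil => intro r ans; rfl
  | cons x xs ih =>
    intro r ans
    have hne : ¬ (((r ++ [x]).length : Int) = m) := by
      have : (0 : Int) ≤ ((r ++ [x]).length : Int) := Int.natCast_nonneg _
      omega
    simp only [solLoopA, hne, if_false]
    exact ih _ _

-- shift a positive-step range by one
theorem pyRange_succ_shift {M : Nat} (hM : 0 < M) (j n : Nat) :
    PySem.List.pyRange ((j : Int) + 1) ((n : Int) + 1) (M : Int) =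
      (PySem.List.pyRange (j : Int) (n : Int) (M : Int)).map (· + 1) := by
  have hMpos : (0 : Int) < (M : Int) := by exact_mod_cast hM
  rw [PySem.List.pyRange_of_pos _ _ hMpos, PySem.List.pyRange_of_pos _ _ hMpos]
  have hiff : ((j : Int) + 1 < (n : Int) + 1) ↔ ((j : Int) < (n : Int)) := by omega
  have hsub : ((n : Int) + 1 - ((j : Int) + 1) + (M : Int) - 1) = ((n : Int) - (j : Int) + (M : Int) - 1) := by ring
  rw [hsub]
  by_cases h : (j : Int) < (n : Int)
  · rw [if_pos (hiff.mpr h), if_pos h, List.map_map]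
    apply List.map_congr_left
    intro a _
    simp only [Function.comp]
    ring
  · rw [if_neg (hiff.not.mpr h), if_neg h]
    simp

-- range(0, n+1, M) is 0 followed by range(M-1, n, M) shifted by one
theorem pyRange_zero_cons {M : Nat} (hM : 0 < M) (n : Nat) :
    PySem.List.pyRange 0 ((n : Int) + 1) (M : Int) =
      0 :: (PySem.List.pyRange ((M : Int) - 1) (n : Int) (M : Int)).map (· + 1) := by
  have hMpos : (0 : Int) < (M : Int) := by exact_mod_cast hM
  rw [PySem.List.pyRange_of_pos _ _ hMpos, PySem.List.pyRange_of_pos _ _ hMpos]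
  have h0 : (0 : Int) < (n : Int) + 1 := by omega
  rw [if_pos h0]
  have hcount : (((n : Int) + 1 - 0 + (M : Int) - 1) / (M : Int)).toNat
      = ((n : Int) / (M : Int)).toNat + 1 := by
    have he : ((n : Int) + 1 - 0 + (M : Int) - 1) = (n : Int) + 1 * (M : Int) := by ring
    rw [he, Int.add_mul_ediv_right _ _ (by omega : (M : Int) ≠ 0)]
    have : (0 : Int) ≤ (n : Int) / (M : Int) := Int.ediv_nonneg (by omega) (by omega)
    omega
  rw [hcount, List.range_succ_eq_map]
  by_cases h : ((M : Int) - 1) < (n : Int)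
  · have hc2 : ((n : Int) - ((M : Int) - 1) + (M : Int) - 1) = (n : Int) := by ring
    rw [if_pos h, hc2]
    simp only [List.map_cons, List.map_map]
    refine congrArg₂ _ (by norm_num) ?_
    apply List.map_congr_left
    intro a _
    simp only [Function.comp]
    push_cast
    ring
  · -- n ≤ M - 1 : the tail range is empty and n / M = 0
    have hnd : (n : Int) / (M : Int) = 0 := by
      apply Int.ediv_eq_zero_of_lt (by omega)
      omega
    rw [if_neg h, hnd]
    simp

-- pyGetD over a cons, shifted index
theorem pyGetD_cons_succ (x : Int) (xs : List Int) {i : Int} (hi : 0 ≤ i) :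
    PySem.List.pyGetD (x :: xs) (i + 1) 0 = PySem.List.pyGetD xs i 0 := by
  obtain ⟨t, rfl⟩ : ∃ t : Nat, i = (t : Int) := ⟨i.toNat, by omega⟩
  have : ((t : Int) + 1) = ((t + 1 : Nat) : Int) := by push_cast; ring
  rw [this, PySem.List.pyGetD_natCast, PySem.List.pyGetD_natCast]
  rfl

-- B's indexed sum over range(j, len d, M) is exactly pickGroup M j d
theorem lemB {M : Nat} (hM : 0 < M) :
    ∀ (d : List Int) (j : Nat),
      (PySem.List.pyRange (j : Int) ((d.length : Nat) : Int) (M : Int)).map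
          (fun i => PySem.List.pyGetD d i 0) = pickGroup M j d := by
  intro d
  induction d with
  | nil =>
    intro j
    have h : PySem.List.pyRange (j : Int) (0 : Int) (M : Int) = [] := by
      rw [PySem.List.pyRange_of_pos _ _ (by exact_mod_cast hM)]
      rw [if_neg (by omega)]
      simp
    simp only [List.length_nil, Nat.cast_zero, h, List.map_nil, pickGroup]
  | cons x xs ih =>
    intro j
    have hlen : (((x :: xs).length : Nat) : Int) = ((xs.length : Nat) : Int) + 1 := by
      push_cast [List.length_cons]; ring
    cases j with
    | zero =>
      have hM1 : (((M - 1 : Nat)) : Int) = (M : Int) - 1 := by omega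
      rw [pickGroup, if_pos rfl]
      rw [show ((0 : Nat) : Int) = (0 : Int) from rfl, hlen,
        pyRange_zero_cons hM xs.length, List.map_cons, List.map_map, ← hM1]
      refine congrArg₂ _ ?_ ?_
      · simp [PySem.List.pyGetD_zero_cons]
      · rw [← ih (M - 1)]
        apply List.map_congr_left
        intro a ha
        have hmem := (PySem.List.mem_pyRange_iff_of_pos (by exact_mod_cast hM) a).mp ha
        simp only [Function.comp]
        exact pyGetD_cons_succ x xs (by omega)
    | succ j' =>
      rw [pickGroup, if_neg (by omega), Nat.add_sub_cancel]
      have hj : ((j' + 1 : Nat) : Int) = ((j' : Nat) : Int) + 1 := by push_cast; ring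
      rw [hj, hlen, pyRange_succ_shift hM j' xs.length, List.map_map, ← ih j']
      apply List.map_congr_left
      intro a ha
      have hmem := (PySem.List.mem_pyRange_iff_of_pos (by exact_mod_cast hM) a).mp ha
      simp only [Function.comp]
      exact pyGetD_cons_succ x xs (by omega)

-- min of a nonempty list all of whose earlier elements are ≥ the last one is that last element
theorem min_append_last {r : List Int} {x : Int} (hge : ∀ y ∈ r, x ≤ y) :
    ((PySem.List.min? (r ++ [x]) (fun y => y)).getD 0) = x := by
  obtain ⟨mn, hmn⟩ : ∃ mn, PySem.List.min? (r ++ [x]) (fun y => y) = some mn := by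
    cases hm : PySem.List.min? (r ++ [x]) (fun y => y) with
    | none =>
      exfalso
      have := (PySem.List.min?_eq_none_iff (r ++ [x]) (fun y => y)).mp hm
      simp at this
    | some mn => exact ⟨mn, rfl⟩
  have hmem : mn ∈ r ++ [x] := PySem.List.min?_mem hmn
  have hmin : ∀ y ∈ r ++ [x], mn ≤ y := PySem.List.min?_isMin hmn
  have hle : mn ≤ x := hmin x (by simp)
  rw [hmn, Option.getD_some]
  rcases List.mem_append.mp hmem with h | h
  · exact le_antisymm hle (hge mn h)
  · simpa using h

-- A's loop on a descending-sorted suffix computes the pickGroup sum times m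
theorem lemA {M : Nat} (hM : 0 < M) :
    ∀ (xs r : List Int) (ans : Int),
      List.Pairwise (fun a b => b ≤ a) xs →
      (∀ y ∈ r, ∀ z ∈ xs, z ≤ y) →
      r.length < M →
      solLoopA (M : Int) xs r ans = ans + (pickGroup M (M - 1 - r.length) xs).sum * (M : Int) := by
  intro xs
  induction xs with
  | nil => intro r ans _ _ _; simp [solLoopA, pickGroup]
  | cons x xs ih =>
    intro r ans hsorted hgr hlt
    have hpw := (List.pairwise_cons.mp hsorted)
    by_cases hfull : r.length + 1 = M
    · have hcond : (((r ++ [x]).length : Nat) : Int) = (M : Int) := by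
        simp; omega
      simp only [solLoopA]
      rw [if_pos hcond]
      rw [min_append_last (fun y hy => hgr y hy x (by simp))]
      rw [ih [] (ans + x * (M : Int)) hpw.2 (by simp) hM]
      have hj : M - 1 - r.length = 0 := by omega
      rw [hj, pickGroup, if_pos rfl]
      simp only [List.sum_cons, List.length_nil, Nat.sub_zero]
      ring
    · have hcond : ¬ ((((r ++ [x]).length : Nat) : Int) = (M : Int)) := by
        simp; omega
      simp only [solLoopA]
      rw [if_neg hcond]
      have hgr' : ∀ y ∈ r ++ [x], ∀ z ∈ xs, z ≤ y := by
        intro y hy z hz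
        rcases List.mem_append.mp hy with h | h
        · exact hgr y h z (List.mem_cons_of_mem _ hz)
        · simp at h; subst h; exact hpw.1 z hz
      rw [ih (r ++ [x]) ans hpw.2 hgr' (by simp; omega)]
      have hj : M - 1 - r.length ≠ 0 := by omega
      rw [pickGroup, if_neg hj]
      have : M - 1 - r.length - 1 = M - 1 - (r ++ [x]).length := by simp; omega
      rw [this]

-- ===== VERDICT (by name: the statement is the Claim_ definition above) =====
theorem solution_spec : Claim_equal_solution := by
  unfold Claim_equal_solution
  intro k m score _ hpre
  unfold Spec_solution solution solution_alt
  have hpair := PySem.List.sorted_pairwise_rev score (fun x => x)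
  show solLoopA m (PySem.List.sorted score (fun x => x) true) [] 0 =
    m * ((PySem.List.pyRange (m - 1) (((PySem.List.sorted score (fun x => x) true).length : Nat) : Int) m).map
      (fun i => PySem.List.pyGetD (PySem.List.sorted score (fun x => x) true) i 0)).sum
  generalize (PySem.List.sorted score (fun x => x) true) = d at hpair ⊢
  rcases lt_or_gt_of_ne hpre with hneg | hpos
  · rw [solLoopA_neg hneg]
    rw [pyRange_neg_empty hneg (by have := Int.natCast_nonneg d.length; omega)]
    simp
  · obtain ⟨M, rfl⟩ : ∃ M : Nat, m = (M : Int) := ⟨m.toNat, by omega⟩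
    have hM : 0 < M := by exact_mod_cast hpos
    have hM1 : ((M : Int) - 1) = (((M - 1 : Nat)) : Int) := by omega
    rw [hM1, lemB hM d (M - 1)]
    rw [lemA hM d [] 0 hpair (by simp) hM]
    simp only [List.length_nil, Nat.sub_zero]
    ring
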